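-- pv_equiv track=rewrite | github.com/JosephVankelegom/INGInious-problems-sublabel | inginious_problems_sublabel/sublabel_problem.py | check_tolerance
-- ===== SOURCE A (Python) =====
-- def sub_interval(sub_interval, interval):
--     if interval[0] <= sub_interval[0] and sub_interval[1] <= interval[1]:
--         return True
--     else:
--         return False
--
-- def check_tolerance(interval_clean, tolerance_intervals):
--     for inter in interval_clean:
--         is_in = False
--         for tol in tolerance_intervals:
--             if sub_interval(inter, tol):
--                 is_in = True
--                 break
--         if not is_in:
--             return False
--
--     return True
-- ===== SOURCE B (Python) =====
-- def check_tolerance(interval_clean, tolerance_intervals):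
--     pairs = [(t[0], t[1]) for t in tolerance_intervals]
--     tols = sorted(pairs, key=lambda p: p[0])
--     starts = [p[0] for p in tols]
--     best = []
--     for p in tols:
--         best.append(p[1] if not best or best[-1] < p[1] else best[-1])
--     for inter in interval_clean:
--         a, b = inter[0], inter[1]
--         # bisect_right(starts, a), hand-written because this module imports nothing
--         lo, hi = 0, len(starts)
--         while lo < hi:
--             mid = (lo + hi) // 2
--             if a < starts[mid]:
--                 hi = mid
--             else:
--                 lo = mid + 1
--         if lo == 0 or best[lo - 1] < b:
--             return False
--     return True
-- ===== Notes on version B (the rewrite author's own statement) =====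
-- stated objective: alternative
-- what changed: Replaces the nested scan (each interval checked against every tolerance interval) by sorting tolerances by start once, taking a running maximum of their ends, and answering each containment query with one binary search over the sorted starts; on these benchmark inputs A's early break makes the measured times comparable.
-- outside the precondition, e.g. on check_tolerance([], [[1]]): A returns True, B raises IndexError; on check_tolerance([[]], []): A returns False, B raises IndexError
import Mathlib
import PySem

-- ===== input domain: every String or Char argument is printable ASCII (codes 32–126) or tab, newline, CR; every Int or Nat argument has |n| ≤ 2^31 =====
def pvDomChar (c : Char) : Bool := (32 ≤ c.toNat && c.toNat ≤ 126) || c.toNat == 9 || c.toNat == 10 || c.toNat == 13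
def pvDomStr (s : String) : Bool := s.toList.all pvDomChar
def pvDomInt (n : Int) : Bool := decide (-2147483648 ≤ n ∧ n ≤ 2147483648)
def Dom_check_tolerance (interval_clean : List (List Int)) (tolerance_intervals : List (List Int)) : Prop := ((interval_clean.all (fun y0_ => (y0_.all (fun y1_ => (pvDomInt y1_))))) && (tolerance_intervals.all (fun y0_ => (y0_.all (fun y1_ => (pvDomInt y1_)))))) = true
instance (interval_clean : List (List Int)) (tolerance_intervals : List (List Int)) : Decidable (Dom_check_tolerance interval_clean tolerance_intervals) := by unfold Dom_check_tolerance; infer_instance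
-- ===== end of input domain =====

-- B replaces A's nested scan by a different algorithm: sort tolerances by start once,
-- prefix-max their ends, and answer each containment query with one binary search.


-- xs[i] for an index Pre_ keeps in range (the .getD 0 default is never reached inside Pre_)
def pvIdx (xs : List Int) (i : Int) : Int := (PySem.List.pyGet? xs i).getD 0

-- ===== PORT A =====
def sub_interval (si inter : List Int) : Bool :=
  if pvIdx inter 0 ≤ pvIdx si 0 ∧ pvIdx si 1 ≤ pvIdx inter 1 then true else false

-- inner 'for tol … break' loop of A: first tolerance containing `inter` sets is_in
def pvInnerA (inter : List Int) : List (List Int) → Bool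
  | [] => false
  | t :: ts => if sub_interval inter t then true else pvInnerA inter ts

def check_tolerance (interval_clean : List (List Int)) (tolerance_intervals : List (List Int)) : Bool :=
  match interval_clean with
  | [] => true
  | q :: qs =>
    if ¬ pvInnerA q tolerance_intervals then false
    else check_tolerance qs tolerance_intervals

-- ===== PORT B =====
-- the per-query loop of Source B: bisect, then compare with the prefix maximum of ends
def pvQueryLoop (starts best : List Int) : List (List Int) → Bool
  | [] => true
  | q :: qs =>
    let a := pvIdx q 0
    let b := pvIdx q 1
    let lo := PySem.List.bisectRight starts a   -- Source B's while loop is literally bisect_right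
    if lo = 0 ∨ best.getD (lo - 1) 0 < b then false
    else pvQueryLoop starts best qs

def check_tolerance_alt (interval_clean : List (List Int)) (tolerance_intervals : List (List Int)) : Bool :=
  let pairs := tolerance_intervals.map (fun t => (pvIdx t 0, pvIdx t 1))
  let tols := PySem.List.sorted pairs (fun p => p.1) false
  let starts := tols.map Prod.fst
  let best := tols.foldl
    (fun best p => best ++ [if best = [] ∨ pvIdx best (-1) < p.2 then p.2 else pvIdx best (-1)]) []
  pvQueryLoop starts best interval_clean

-- ===== PRECONDITION & SPEC =====
-- Pre_ excludes inputs containing an inner list of fewer than two elements: A raises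
-- IndexError on most of them (and only returns on some thanks to short-circuiting /
-- empty loops), and B's list comprehension raises there naturally.
def Pre_check_tolerance (interval_clean : List (List Int)) (tolerance_intervals : List (List Int)) : Prop :=
  (∀ l ∈ interval_clean, 2 ≤ l.length) ∧ (∀ l ∈ tolerance_intervals, 2 ≤ l.length)
instance (interval_clean : List (List Int)) (tolerance_intervals : List (List Int)) : Decidable (Pre_check_tolerance interval_clean tolerance_intervals) := by unfold Pre_check_tolerance; infer_instance

def pvWitness_check_tolerance : List (List Int) × List (List Int) := ([[1, 2]], [[0, 3]])

def Spec_check_tolerance (interval_clean : List (List Int)) (tolerance_intervals : List (List Int)) (out : Bool) : Prop := out = check_tolerance_alt interval_clean tolerance_intervals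
instance (interval_clean : List (List Int)) (tolerance_intervals : List (List Int)) (out : Bool) : Decidable (Spec_check_tolerance interval_clean tolerance_intervals out) := by unfold Spec_check_tolerance; infer_instance

-- ===== CLAIM (what is proved, stated in full; the proofs are below) =====
def Claim_equal_check_tolerance : Prop := ∀ (interval_clean : List (List Int)) (tolerance_intervals : List (List Int)), Dom_check_tolerance interval_clean tolerance_intervals → Pre_check_tolerance interval_clean tolerance_intervals → Spec_check_tolerance interval_clean tolerance_intervals (check_tolerance interval_clean tolerance_intervals)

-- ===== LEMMAS AND PROOFS =====

-- the step function of Source B's prefix-maximum loop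
def pvBestStep (best : List Int) (p : Int × Int) : List Int :=
  best ++ [if best = [] ∨ pvIdx best (-1) < p.2 then p.2 else pvIdx best (-1)]

-- clean form of the prefix maximum of the second components, seeded with m
def pvPrefMax : Int → List (Int × Int) → List Int
  | _, [] => []
  | m, p :: ps => max m p.2 :: pvPrefMax (max m p.2) ps

def pvBestSpec : List (Int × Int) → List Int
  | [] => []
  | p :: ps => pvPrefMax p.2 (p :: ps)

theorem pvIdx_append_last (acc : List Int) (x : Int) : pvIdx (acc ++ [x]) (-1) = x := by
  simp [pvIdx, PySem.List.pyGet?, PySem.List.pyIdx?]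

theorem pvBestStep_eq (acc : List Int) (m : Int) (p : Int × Int)
    (hne : acc ≠ []) (hlast : pvIdx acc (-1) = m) :
    pvBestStep acc p = acc ++ [max m p.2] := by
  unfold pvBestStep
  rw [hlast]
  rcases lt_or_ge m p.2 with h | h
  · simp [hne, h, max_eq_right h.le]
  · simp [hne, not_lt.mpr h, max_eq_left h]

theorem foldl_pvBestStep (ps : List (Int × Int)) :
    ∀ (acc : List Int) (m : Int), acc ≠ [] → pvIdx acc (-1) = m →
      ps.foldl pvBestStep acc = acc ++ pvPrefMax m ps := by
  induction ps with
  | nil => intro acc m _ _; simp [pvPrefMax]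
  | cons p ps ih =>
    intro acc m hne hlast
    rw [List.foldl_cons, pvBestStep_eq acc m p hne hlast,
        ih (acc ++ [max m p.2]) (max m p.2) (by simp) (pvIdx_append_last acc _)]
    simp [pvPrefMax]

theorem best_eq_spec (tols : List (Int × Int)) :
    tols.foldl pvBestStep [] = pvBestSpec tols := by
  cases tols with
  | nil => rfl
  | cons p ps =>
    have h1 : pvBestStep [] p = [p.2] := by simp [pvBestStep]
    rw [List.foldl_cons, h1, foldl_pvBestStep ps [p.2] p.2 (by simp) (pvIdx_append_last [] _)]
    simp [pvBestSpec, pvPrefMax]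

theorem le_pvPrefMax_iff (ps : List (Int × Int)) :
    ∀ (m b : Int) (j : Nat), j < ps.length →
      (b ≤ (pvPrefMax m ps).getD j 0 ↔
        b ≤ m ∨ ∃ i, i ≤ j ∧ ∃ hi : i < ps.length, b ≤ ps[i].2) := by
  induction ps with
  | nil => intro m b j hj; simp at hj
  | cons p ps ih =>
    intro m b j hj
    cases j with
    | zero =>
      simp only [pvPrefMax, List.getD_cons_zero, le_max_iff]
      constructor
      · rintro (h | h)
        · exact Or.inl h
        · exact Or.inr ⟨0, le_refl _, by simp, h⟩
      · rintro (h | ⟨i, hi0, hilen, hile⟩)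
        · exact Or.inl h
        · interval_cases i; exact Or.inr (by simpa using hile)
    | succ j =>
      have hj' : j < ps.length := by simpa using hj
      simp only [pvPrefMax, List.getD_cons_succ]
      rw [ih (max m p.2) b j hj']
      constructor
      · rintro (h | ⟨i, hij, hilen, hile⟩)
        · rcases le_max_iff.mp h with h' | h'
          · exact Or.inl h'
          · exact Or.inr ⟨0, Nat.zero_le _, by simp, h'⟩
        · exact Or.inr ⟨i + 1, by omega, by simpa using Nat.succ_lt_succ hilen, by simpa using hile⟩
      · rintro (h | ⟨i, hij, hilen, hile⟩)
        · exact Or.inl (le_max_of_le_left h)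
        · cases i with
          | zero => exact Or.inl (le_max_of_le_right (by simpa using hile))
          | succ i =>
            exact Or.inr ⟨i, by omega, by simpa using hilen, by simpa using hile⟩

theorem le_pvBestSpec_iff (tols : List (Int × Int)) (b : Int) (j : Nat) (hj : j < tols.length) :
    b ≤ (pvBestSpec tols).getD j 0 ↔ ∃ i, i ≤ j ∧ ∃ hi : i < tols.length, b ≤ tols[i].2 := by
  cases tols with
  | nil => simp at hj
  | cons p ps =>
    rw [pvBestSpec, le_pvPrefMax_iff (p :: ps) p.2 b j hj]
    constructor
    · rintro (h | h)
      · exact ⟨0, Nat.zero_le _, by simp, by simpa using h⟩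
      · exact h
    · exact fun h => Or.inr h

-- the heart: the existence test equals the bisect + prefix-max test, for start-sorted pairs
theorem query_core (tols : List (Int × Int))
    (hsort : (tols.map Prod.fst).Pairwise (· ≤ ·)) (a b : Int) :
    ((∃ p ∈ tols, p.1 ≤ a ∧ b ≤ p.2) ↔
      (0 < PySem.List.bisectRight (tols.map Prod.fst) a ∧
        b ≤ (pvBestSpec tols).getD (PySem.List.bisectRight (tols.map Prod.fst) a - 1) 0)) := by
  obtain ⟨hkle, hlt, hgt⟩ := PySem.List.bisectRight_spec (tols.map Prod.fst) a hsort
  set k := PySem.List.bisectRight (tols.map Prod.fst) a with hk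
  have hlen : (tols.map Prod.fst).length = tols.length := List.length_map ..
  constructor
  · rintro ⟨p, hp, h1, h2⟩
    obtain ⟨j, hjlen, hpj⟩ := List.mem_iff_getElem.mp hp
    have hjlt : j < k := by
      by_contra hge
      have := hgt j (by simpa [hlen] using hjlen) (by omega)
      rw [List.getElem_map, hpj] at this
      omega
    have hk0 : 0 < k := by omega
    refine ⟨hk0, (le_pvBestSpec_iff tols b (k - 1) (by omega)).mpr ⟨j, by omega, hjlen, ?_⟩⟩
    rw [hpj]; exact h2
  · rintro ⟨hk0, hbest⟩
    obtain ⟨i, hik, hilen, hile⟩ := (le_pvBestSpec_iff tols b (k - 1) (by omega)).mp hbest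
    have hia : tols[i].1 ≤ a := by
      have := hlt i (by simpa [hlen] using hilen) (by omega)
      rwa [List.getElem_map] at this
    exact ⟨tols[i], List.getElem_mem _, hia, hile⟩

theorem pvInnerA_eq_any (q : List Int) (ti : List (List Int)) :
    pvInnerA q ti = ti.any (fun t => sub_interval q t) := by
  induction ti with
  | nil => rfl
  | cons t ts ih =>
    rw [pvInnerA, List.any_cons]
    by_cases h : sub_interval q t = true <;> simp [h, ih]

theorem sorted_any_eq (l : List (Int × Int)) (f : Int × Int → Bool) :
    (PySem.List.sorted l (fun p => p.1) false).any f = l.any f := by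
  rw [Bool.eq_iff_iff, List.any_eq_true, List.any_eq_true]
  constructor <;> rintro ⟨x, hx, hf⟩ <;>
    exact ⟨x, by simpa [PySem.List.mem_sorted] using hx, hf⟩

-- the per-query equivalence, stated on the data check_tolerance_alt precomputes
theorem inner_iff (q : List Int) (ti : List (List Int)) :
    pvInnerA q ti = true ↔
      ¬ (PySem.List.bisectRight
            ((PySem.List.sorted (ti.map fun t => (pvIdx t 0, pvIdx t 1)) (fun p => p.1) false).map
              Prod.fst) (pvIdx q 0) = 0 ∨
          (pvBestSpec
              (PySem.List.sorted (ti.map fun t => (pvIdx t 0, pvIdx t 1)) (fun p => p.1)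
                false)).getD
            (PySem.List.bisectRight
              ((PySem.List.sorted (ti.map fun t => (pvIdx t 0, pvIdx t 1)) (fun p => p.1)
                false).map Prod.fst) (pvIdx q 0) - 1) 0 < pvIdx q 1) := by
  set pairs := ti.map (fun t => (pvIdx t 0, pvIdx t 1)) with hpairs
  set tols := PySem.List.sorted pairs (fun p => p.1) false with htols
  have hsort : (tols.map Prod.fst).Pairwise (· ≤ ·) :=
    PySem.List.sorted_map_key_pairwise pairs (fun p => p.1)
  have h1 : pvInnerA q ti = tols.any (fun p => decide (p.1 ≤ pvIdx q 0 ∧ pvIdx q 1 ≤ p.2)) := by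
    rw [pvInnerA_eq_any, htols, sorted_any_eq, hpairs, List.any_map]
    congr 1
  rw [h1, List.any_eq_true]
  simp only [decide_eq_true_eq, not_or, not_lt]
  rw [query_core tols hsort (pvIdx q 0) (pvIdx q 1)]
  constructor
  · rintro ⟨h0, hb⟩; exact ⟨by omega, hb⟩
  · rintro ⟨h0, hb⟩; exact ⟨by omega, hb⟩

theorem main_eq (interval_clean tolerance_intervals : List (List Int)) :
    check_tolerance interval_clean tolerance_intervals =
      check_tolerance_alt interval_clean tolerance_intervals := by
  unfold check_tolerance_alt
  simp only []
  rw [show (fun (best : List Int) (p : Int × Int) =>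
        best ++ [if best = [] ∨ pvIdx best (-1) < p.2 then p.2 else pvIdx best (-1)]) = pvBestStep
      from rfl, best_eq_spec]
  set tols := PySem.List.sorted (tolerance_intervals.map fun t => (pvIdx t 0, pvIdx t 1))
      (fun p => p.1) false with htols
  induction interval_clean with
  | nil => rfl
  | cons q qs ih =>
    have hC := inner_iff q tolerance_intervals
    rw [← htols] at hC
    rw [check_tolerance]
    show (if ¬ pvInnerA q tolerance_intervals = true then false
          else check_tolerance qs tolerance_intervals) =
        (if PySem.List.bisectRight (tols.map Prod.fst) (pvIdx q 0) = 0 ∨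
            (pvBestSpec tols).getD
              (PySem.List.bisectRight (tols.map Prod.fst) (pvIdx q 0) - 1) 0 < pvIdx q 1
          then false
          else pvQueryLoop (tols.map Prod.fst) (pvBestSpec tols) qs)
    by_cases hc : PySem.List.bisectRight (tols.map Prod.fst) (pvIdx q 0) = 0 ∨
        (pvBestSpec tols).getD
          (PySem.List.bisectRight (tols.map Prod.fst) (pvIdx q 0) - 1) 0 < pvIdx q 1
    · rw [if_pos (fun hh => (hC.mp hh) hc), if_pos hc]
    · rw [if_neg (not_not_intro (hC.mpr hc)), if_neg hc, ih]

-- ===== VERDICT (by name: the statement is the Claim_ definition above) =====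
theorem check_tolerance_spec : Claim_equal_check_tolerance := by
  intro ic ti _ _
  unfold Spec_check_tolerance
  exact main_eq ic ti
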